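-- pv_equiv track=rewrite | github.com/PeterDeWeirdt/gpp-guide-design | utils/featurization/__init__.py | get_context_order
-- ===== SOURCE A (Python) =====
-- def get_context_order(k, pam_start, pam_length, guide_start, guide_length):
--     """
--
--     :param k: length of kmer
--     :param pam_start: indexed starting at one
--     :param pam_length:
--     :param guide_start:
--     :param guide_length:
--     :return: list of characters of each nt position
--     """
--     pam_order = ['P' + str(x) for x in range(1, pam_length + 1)]
--     guide_order = [str(x) for x in range(1, guide_length + 1)]
--     if pam_start == min(pam_start, guide_start):
--         second_ord = pam_order
--         third_ord = guide_order
--     else: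
--         second_ord = guide_order
--         third_ord = pam_order
--
--     context_order = ['-' + str(x) for x in reversed(range(1, min(pam_start, guide_start)))] + \
--                     second_ord + third_ord + ['+' + str(x) for x in range(1, k - min(pam_start, guide_start) + 1 -
--                                                                           len(second_ord) -
--                                                                           len(third_ord) + 1)]
--     return context_order
-- ===== SOURCE B (Python) =====
-- def get_context_order(k, pam_start, pam_length, guide_start, guide_length):
--     m = min(pam_start, guide_start)
--     p = max(0, pam_length)
--     g = max(0, guide_length)
--     negc = max(0, m - 1)
--     plusc = max(0, k - m + 1 - p - g)
--     if pam_start <= guide_start: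
--         first_len, first_pref, second_len, second_pref = p, 'P', g, ''
--     else:
--         first_len, first_pref, second_len, second_pref = g, '', p, 'P'
--
--     def label(i):
--         if i < negc:
--             return '-' + str(negc - i)
--         j = i - negc
--         if j < first_len:
--             return first_pref + str(j + 1)
--         j -= first_len
--         if j < second_len:
--             return second_pref + str(j + 1)
--         return '+' + str(j - second_len + 1)
--
--     return [label(i) for i in range(negc + first_len + second_len + plusc)]
-- ===== Notes on version B (the rewrite author's own statement) =====
-- stated objective: alternative
-- what changed: A concatenates four separately built list comprehensions (with a reversed countdown and tuple-selected middle blocks); B computes the four block sizes up front and emits the whole list in one pass over output positions 0..total-1 via a position-to-label function.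
import Mathlib
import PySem

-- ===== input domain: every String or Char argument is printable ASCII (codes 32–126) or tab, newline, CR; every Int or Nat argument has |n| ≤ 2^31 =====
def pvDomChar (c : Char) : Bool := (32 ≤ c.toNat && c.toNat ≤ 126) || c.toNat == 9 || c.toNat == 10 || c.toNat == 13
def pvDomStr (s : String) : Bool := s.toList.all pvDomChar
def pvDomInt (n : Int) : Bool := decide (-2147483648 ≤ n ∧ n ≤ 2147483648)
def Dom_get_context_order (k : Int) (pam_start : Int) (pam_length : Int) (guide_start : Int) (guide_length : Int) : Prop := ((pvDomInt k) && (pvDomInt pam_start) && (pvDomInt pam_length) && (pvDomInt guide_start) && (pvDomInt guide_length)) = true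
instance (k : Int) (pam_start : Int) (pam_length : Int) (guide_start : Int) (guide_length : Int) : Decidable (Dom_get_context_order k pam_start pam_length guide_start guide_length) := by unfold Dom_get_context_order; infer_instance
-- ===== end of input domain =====

-- B replaces A's four concatenated comprehensions by one single pass over output
-- positions with a position→label function (objective: alternative decomposition).

-- ===== PORT A =====
-- literal transliteration of A: four list comprehensions concatenated
def get_context_order (k : Int) (pam_start : Int) (pam_length : Int) (guide_start : Int) (guide_length : Int) : List String :=
  let pam_order := (PySem.List.pyRange 1 (pam_length + 1) 1).map (fun x => "P" ++ PySem.Int.toStr x)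
  let guide_order := (PySem.List.pyRange 1 (guide_length + 1) 1).map (fun x => PySem.Int.toStr x)
  let second_ord := if pam_start = min pam_start guide_start then pam_order else guide_order
  let third_ord := if pam_start = min pam_start guide_start then guide_order else pam_order
  ((PySem.List.pyRange 1 (min pam_start guide_start) 1).reverse.map (fun x => "-" ++ PySem.Int.toStr x))
    ++ second_ord ++ third_ord
    ++ (PySem.List.pyRange 1 (k - min pam_start guide_start + 1 - (second_ord.length : Int) - (third_ord.length : Int) + 1) 1).map
        (fun x => "+" ++ PySem.Int.toStr x)

-- ===== PORT B =====
-- B's nested `label` helper: maps an output position to its label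
def gco_label (negc firstLen secondLen : Int) (firstPref secondPref : String) (i : Int) : String :=
  if i < negc then "-" ++ PySem.Int.toStr (negc - i)
  else
    let j := i - negc
    if j < firstLen then firstPref ++ PySem.Int.toStr (j + 1)
    else
      let j2 := j - firstLen
      if j2 < secondLen then secondPref ++ PySem.Int.toStr (j2 + 1)
      else "+" ++ PySem.Int.toStr (j2 - secondLen + 1)

def get_context_order_alt (k : Int) (pam_start : Int) (pam_length : Int) (guide_start : Int) (guide_length : Int) : List String :=
  let m := min pam_start guide_start
  let p := max 0 pam_length
  let g := max 0 guide_length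
  let negc := max 0 (m - 1)
  let plusc := max 0 (k - m + 1 - p - g)
  let fl := if pam_start ≤ guide_start then p else g
  let fp := if pam_start ≤ guide_start then "P" else ""
  let sl := if pam_start ≤ guide_start then g else p
  let sp := if pam_start ≤ guide_start then "" else "P"
  (PySem.List.pyRange 0 (negc + fl + sl + plusc) 1).map (gco_label negc fl sl fp sp)

-- ===== PRECONDITION & SPEC =====
def Spec_get_context_order (k : Int) (pam_start : Int) (pam_length : Int) (guide_start : Int) (guide_length : Int) (out : List String) : Prop := out = get_context_order_alt k pam_start pam_length guide_start guide_length
instance (k : Int) (pam_start : Int) (pam_length : Int) (guide_start : Int) (guide_length : Int) (out : List String) : Decidable (Spec_get_context_order k pam_start pam_length guide_start guide_length out) := by unfold Spec_get_context_order; infer_instance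

-- ===== CLAIM (what is proved, stated in full; the proofs are below) =====
def Claim_equal_get_context_order : Prop := ∀ (k : Int) (pam_start : Int) (pam_length : Int) (guide_start : Int) (guide_length : Int), Dom_get_context_order k pam_start pam_length guide_start guide_length → Spec_get_context_order k pam_start pam_length guide_start guide_length (get_context_order k pam_start pam_length guide_start guide_length)

-- ===== LEMMAS AND PROOFS =====

theorem gco_label_neg (negc fl sl : Int) (p1 p2 : String) (i : Int) (h : i < negc) :
    gco_label negc fl sl p1 p2 i = "-" ++ PySem.Int.toStr (negc - i) := by
  unfold gco_label; rw [if_pos h]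

theorem gco_label_first (negc fl sl : Int) (p1 p2 : String) (i : Int)
    (h1 : negc ≤ i) (h2 : i - negc < fl) :
    gco_label negc fl sl p1 p2 i = p1 ++ PySem.Int.toStr (i - negc + 1) := by
  unfold gco_label; rw [if_neg (by omega), if_pos h2]

theorem gco_label_second (negc fl sl : Int) (p1 p2 : String) (i : Int)
    (h1 : negc + fl ≤ i) (h2 : i - negc - fl < sl) (hfl : 0 ≤ fl) :
    gco_label negc fl sl p1 p2 i = p2 ++ PySem.Int.toStr (i - negc - fl + 1) := by
  unfold gco_label; rw [if_neg (by omega), if_neg (by omega), if_pos h2]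

theorem gco_label_plus (negc fl sl : Int) (p1 p2 : String) (i : Int)
    (h1 : negc + fl + sl ≤ i) (hfl : 0 ≤ fl) (hsl : 0 ≤ sl) :
    gco_label negc fl sl p1 p2 i = "+" ++ PySem.Int.toStr (i - negc - fl - sl + 1) := by
  unfold gco_label; rw [if_neg (by omega), if_neg (by omega), if_neg (by omega)]

-- an empty-or-not clamp on the upper bound of a 1-based range
theorem range_clamp (n : Int) :
    PySem.List.pyRange 1 (n + 1) 1 = PySem.List.pyRange 1 (max 0 n + 1) 1 := by
  by_cases h : 0 ≤ n
  · rw [max_eq_right h]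
  · rw [PySem.List.pyRange_one_eq_nil (by omega), PySem.List.pyRange_one_eq_nil (by omega)]

-- the single-pass map over one block equals the corresponding comprehension of A
theorem core (k m fl sl : Int) (p1 p2 : String) (hfl : 0 ≤ fl) (hsl : 0 ≤ sl) :
    ((PySem.List.pyRange 1 m 1).reverse.map (fun x => "-" ++ PySem.Int.toStr x))
      ++ (PySem.List.pyRange 1 (fl + 1) 1).map (fun x => p1 ++ PySem.Int.toStr x)
      ++ (PySem.List.pyRange 1 (sl + 1) 1).map (fun x => p2 ++ PySem.Int.toStr x)
      ++ (PySem.List.pyRange 1 (k - m + 1 - fl - sl + 1) 1).map (fun x => "+" ++ PySem.Int.toStr x)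
    = (PySem.List.pyRange 0 (max 0 (m - 1) + fl + sl + max 0 (k - m + 1 - fl - sl)) 1).map
        (gco_label (max 0 (m - 1)) fl sl p1 p2) := by
  set negc := max 0 (m - 1) with hnegc
  set plusc := max 0 (k - m + 1 - fl - sl) with hplusc
  have h0 : (0 : Int) ≤ negc := le_max_left _ _
  have h0p : (0 : Int) ≤ plusc := le_max_left _ _
  rw [PySem.List.pyRange_one_append 0 negc (negc + fl + sl + plusc) h0 (by omega),
      PySem.List.pyRange_one_append negc (negc + fl) (negc + fl + sl + plusc) (by omega) (by omega),
      PySem.List.pyRange_one_append (negc + fl) (negc + fl + sl) (negc + fl + sl + plusc) (by omega) (by omega)]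
  simp only [List.map_append, List.append_assoc]
  congr 1
  · -- negative block
    have hrev : (PySem.List.pyRange 1 m 1).reverse = PySem.List.pyRange (m - 1) 0 (-1) := by
      rw [PySem.List.pyRange_neg_one_eq_reverse]; norm_num
    rw [hrev, PySem.List.pyRange_neg_one, PySem.List.pyRange_one, List.map_map, List.map_map]
    have hlen : (m - 1 - 0).toNat = (negc - 0).toNat := by omega
    rw [hlen]
    refine List.map_congr_left ?_
    intro kk hk
    rw [List.mem_range] at hk
    have hk' : (kk : Int) < negc := by omega
    simp only [Function.comp]
    rw [gco_label_neg _ _ _ _ _ _ (by omega)]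
    have : m - 1 - (kk : Int) = negc - (0 + (kk : Int)) := by omega
    rw [this]
  congr 1
  · -- first block
    rw [PySem.List.pyRange_one 1 (fl + 1), PySem.List.pyRange_one negc (negc + fl), List.map_map, List.map_map]
    have hlen : (negc + fl - negc).toNat = (fl + 1 - 1).toNat := by omega
    rw [hlen]
    refine List.map_congr_left ?_
    intro kk hk
    rw [List.mem_range] at hk
    simp only [Function.comp]
    rw [gco_label_first _ _ _ _ _ _ (by omega) (by omega)]
    have : negc + (kk : Int) - negc + 1 = 1 + (kk : Int) := by omega
    rw [this]
  congr 1
  · -- second block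
    rw [PySem.List.pyRange_one 1 (sl + 1), PySem.List.pyRange_one (negc + fl) (negc + fl + sl), List.map_map, List.map_map]
    have hlen : (negc + fl + sl - (negc + fl)).toNat = (sl + 1 - 1).toNat := by omega
    rw [hlen]
    refine List.map_congr_left ?_
    intro kk hk
    rw [List.mem_range] at hk
    simp only [Function.comp]
    rw [gco_label_second _ _ _ _ _ _ (by omega) (by omega) hfl]
    have : negc + fl + (kk : Int) - negc - fl + 1 = 1 + (kk : Int) := by omega
    rw [this]
  · -- plus block
    rw [PySem.List.pyRange_one 1 (k - m + 1 - fl - sl + 1), PySem.List.pyRange_one (negc + fl + sl) (negc + fl + sl + plusc), List.map_map, List.map_map]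
    have hlen : (negc + fl + sl + plusc - (negc + fl + sl)).toNat = (k - m + 1 - fl - sl + 1 - 1).toNat := by omega
    rw [hlen]
    refine List.map_congr_left ?_
    intro kk hk
    rw [List.mem_range] at hk
    simp only [Function.comp]
    rw [gco_label_plus _ _ _ _ _ _ (by omega) hfl hsl]
    have : negc + fl + sl + (kk : Int) - negc - fl - sl + 1 = 1 + (kk : Int) := by omega
    rw [this]

-- ===== VERDICT (by name: the statement is the Claim_ definition above) =====
theorem get_context_order_spec : Claim_equal_get_context_order := by
  intro k ps pl gs gl _
  simp only [Spec_get_context_order, get_context_order, get_context_order_alt]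
  have hp : ((pl + 1 - 1).toNat : Int) = max 0 pl := by omega
  have hg : ((gl + 1 - 1).toNat : Int) = max 0 gl := by omega
  by_cases hle : ps ≤ gs
  · have hA : ps = min ps gs := (min_eq_left hle).symm
    simp only [if_pos hA, if_pos hle, List.length_map, PySem.List.length_pyRange_one, hp, hg]
    rw [range_clamp pl, range_clamp gl,
        show (fun x => PySem.Int.toStr x) = (fun x => "" ++ PySem.Int.toStr x) from
          funext fun x => (String.empty_append).symm]
    exact core k (min ps gs) (max 0 pl) (max 0 gl) "P" "" (le_max_left _ _) (le_max_left _ _)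
  · have hA : ¬ ps = min ps gs := by
      have := min_eq_right (le_of_lt (not_le.mp hle)); omega
    simp only [if_neg hA, if_neg hle, List.length_map, PySem.List.length_pyRange_one, hp, hg]
    rw [range_clamp pl, range_clamp gl,
        show (fun x => PySem.Int.toStr x) = (fun x => "" ++ PySem.Int.toStr x) from
          funext fun x => (String.empty_append).symm,
        show k - min ps gs + 1 - max 0 pl - max 0 gl = k - min ps gs + 1 - max 0 gl - max 0 pl from by ring]
    exact core k (min ps gs) (max 0 gl) (max 0 pl) "" "P" (le_max_left _ _) (le_max_left _ _)
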